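-- pv_equiv track=rewrite | github.com/micheloosterhof/stethoscope | lib.py | plaintext_autokey_minuend_decrypt
-- ===== SOURCE A (Python) =====
-- from typing import Dict, List
--
-- MAX = 29
--
-- def plaintext_autokey_minuend_decrypt(
--     ciphertext: List[int], primer: List[int] = [0]
-- ) -> List[int]:
--     """
--     Minuend primitive without any console output, P=K-C
--     """
--     key: List[int] = primer.copy()
--     output: List[int] = []
--     for j in range(0, len(ciphertext)):
--         c = (key[j] - ciphertext[j]) % MAX
--         output.append(c)
--         key.append(c)
--     return output
-- ===== SOURCE B (Python) =====
-- MAX = 29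
--
-- def plaintext_autokey_minuend_decrypt(ciphertext, primer=[0]):
--     # Closed form per residue class mod len(primer): unfolding the autokey
--     # recurrence gives output[j] = (primer[j % p] - sum of ciphertext[j % p],
--     # ciphertext[j % p + p], ..., ciphertext[j]) % MAX, so one running sum per
--     # residue class replaces the feedback through previously produced plaintext.
--     p = len(primer)
--     acc = [0] * p
--     output = []
--     for j, c in enumerate(ciphertext):
--         r = j % p
--         acc[r] = (acc[r] + c) % MAX
--         output.append((primer[r] - acc[r]) % MAX)
--     return output
-- ===== Notes on version B (the rewrite author's own statement) =====
-- stated objective: alternative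
-- what changed: Replaces the autokey feedback (a growing key list of primer + previously produced plaintext) with the unfolded closed form per residue class mod len(primer): a fixed array of running ciphertext sums, so no produced output is ever read back.
import Mathlib
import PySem

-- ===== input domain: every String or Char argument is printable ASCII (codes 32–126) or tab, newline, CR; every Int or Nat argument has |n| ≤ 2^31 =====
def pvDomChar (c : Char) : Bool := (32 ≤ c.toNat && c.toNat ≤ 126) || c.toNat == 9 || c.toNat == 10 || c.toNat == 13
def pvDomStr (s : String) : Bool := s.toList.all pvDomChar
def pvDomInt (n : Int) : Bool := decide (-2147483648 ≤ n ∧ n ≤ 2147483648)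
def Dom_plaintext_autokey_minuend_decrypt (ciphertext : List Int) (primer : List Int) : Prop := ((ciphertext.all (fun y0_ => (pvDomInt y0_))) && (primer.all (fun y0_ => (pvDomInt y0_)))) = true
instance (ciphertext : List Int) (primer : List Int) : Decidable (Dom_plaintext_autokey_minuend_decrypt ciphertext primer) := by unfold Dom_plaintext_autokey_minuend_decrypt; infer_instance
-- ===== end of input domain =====

-- ===== PORT A =====
-- B replaces the feedback key list with per-residue-class running ciphertext sums (closed form); equal return value proved below.
def plaintext_autokey_minuend_decrypt (ciphertext : List Int) (primer : List Int) : List Int :=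
  -- key = primer.copy(); output = []; for j in range(len(ciphertext)): c = (key[j]-ciphertext[j]) % 29; output.append(c); key.append(c)
  ((List.range ciphertext.length).foldl
    (fun (s : List Int × List Int) (j : Nat) =>
      let c := PySem.Int.mod ((PySem.List.pyGet? s.1 (j : Int)).getD 0
                              - (PySem.List.pyGet? ciphertext (j : Int)).getD 0) 29
      (s.1 ++ [c], s.2 ++ [c]))
    (primer, [])).2

-- ===== PORT B =====
-- loop body of Source B: r = j % p; acc[r] = (acc[r] + c) % 29; output.append((primer[r] - acc[r]) % 29)
def pvBStep (primer : List Int) (s : List Int × List Int) (jc : Int × Int) : List Int × List Int :=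
  let r := PySem.Int.mod jc.1 (primer.length : Int)
  let acc := PySem.List.pySetD s.1 r (PySem.Int.mod ((PySem.List.pyGet? s.1 r).getD 0 + jc.2) 29)
  (acc, s.2 ++ [PySem.Int.mod ((PySem.List.pyGet? primer r).getD 0 - (PySem.List.pyGet? acc r).getD 0) 29])

def plaintext_autokey_minuend_decrypt_alt (ciphertext : List Int) (primer : List Int) : List Int :=
  -- p = len(primer); acc = [0]*p; for j, c in enumerate(ciphertext): <pvBStep>
  ((PySem.List.enumerate ciphertext).foldl (pvBStep primer)
    (List.replicate primer.length 0, [])).2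

-- ===== PRECONDITION & SPEC =====
-- Pre_ excludes only inputs where Python A raises IndexError (empty primer with nonempty ciphertext; B raises there too).
def Pre_plaintext_autokey_minuend_decrypt (ciphertext : List Int) (primer : List Int) : Prop :=
  primer ≠ [] ∨ ciphertext = []
instance (ciphertext : List Int) (primer : List Int) : Decidable (Pre_plaintext_autokey_minuend_decrypt ciphertext primer) := by unfold Pre_plaintext_autokey_minuend_decrypt; infer_instance
def pvWitness_plaintext_autokey_minuend_decrypt : List Int × List Int := ([5, 3, 17], [2])
def Spec_plaintext_autokey_minuend_decrypt (ciphertext : List Int) (primer : List Int) (out : List Int) : Prop := out = plaintext_autokey_minuend_decrypt_alt ciphertext primer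
instance (ciphertext : List Int) (primer : List Int) (out : List Int) : Decidable (Spec_plaintext_autokey_minuend_decrypt ciphertext primer out) := by unfold Spec_plaintext_autokey_minuend_decrypt; infer_instance

-- ===== CLAIM (what is proved, stated in full; the proofs are below) =====
def Claim_equal_plaintext_autokey_minuend_decrypt : Prop := ∀ (ciphertext : List Int) (primer : List Int), Dom_plaintext_autokey_minuend_decrypt ciphertext primer → Pre_plaintext_autokey_minuend_decrypt ciphertext primer → Spec_plaintext_autokey_minuend_decrypt ciphertext primer (plaintext_autokey_minuend_decrypt ciphertext primer)

-- ===== LEMMAS AND PROOFS =====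

-- common step: append (key[j] - ciphertext[j]) % 29 where key = primer ++ out
def pvStep (ciphertext primer out : List Int) (j : Nat) : List Int :=
  out ++ [PySem.Int.mod ((PySem.List.pyGet? (primer ++ out) (j : Int)).getD 0
                         - (PySem.List.pyGet? ciphertext (j : Int)).getD 0) 29]

-- A's fold keeps the invariant key = primer ++ output
theorem pvA_inv (ciphertext primer : List Int) (l : List Nat) (out : List Int) :
    (l.foldl (fun (s : List Int × List Int) (j : Nat) =>
      let c := PySem.Int.mod ((PySem.List.pyGet? s.1 (j : Int)).getD 0
                              - (PySem.List.pyGet? ciphertext (j : Int)).getD 0) 29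
      (s.1 ++ [c], s.2 ++ [c])) (primer ++ out, out))
    = (primer ++ l.foldl (pvStep ciphertext primer) out, l.foldl (pvStep ciphertext primer) out) := by
  induction l generalizing out with
  | nil => rfl
  | cons j l ih =>
    simp only [List.foldl_cons]
    rw [show (primer ++ out) ++ [PySem.Int.mod ((PySem.List.pyGet? (primer ++ out) (j : Int)).getD 0 - (PySem.List.pyGet? ciphertext (j : Int)).getD 0) 29] = primer ++ pvStep ciphertext primer out j from by simp [pvStep]]
    exact ih _

-- B's loop invariant: acc[(j+k) % p] ≡ primer[(j+k) % p] - key[j+k]  (mod 29), key = primer ++ out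
theorem pvB_loop (ciphertext primer : List Int) (hp : 0 < primer.length)
    (cs : List Int) (j : Nat) (out acc : List Int)
    (hcs : ∀ i : Nat, cs[i]? = ciphertext[j + i]?)
    (hout : out.length = j)
    (hacc : acc.length = primer.length)
    (hinv : ∀ k, k < primer.length →
      ((acc[(j + k) % primer.length]?).getD 0) % 29
        = (((primer[(j + k) % primer.length]?).getD 0)
            - ((primer ++ out)[j + k]?).getD 0) % 29) :
    ((PySem.List.enumerate cs (j : Int)).foldl (pvBStep primer) (acc, out)).2
      = (List.range' j cs.length).foldl (pvStep ciphertext primer) out := by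
  induction cs generalizing j out acc with
  | nil => rfl
  | cons c cs ih =>
    have hc : ciphertext[j]? = some c := by have := hcs 0; simpa using this.symm
    have hr0 : j % primer.length < primer.length := Nat.mod_lt _ hp
    have hr0a : j % primer.length < acc.length := by rw [hacc]; exact hr0
    have hmodpos : ∀ a : Int, PySem.Int.mod a 29 = a % 29 := fun a =>
      PySem.Int.mod_eq_emod_of_pos (by norm_num)
    set v := PySem.Int.mod ((acc[j % primer.length]?).getD 0 + c) 29 with hvdef
    set e := PySem.Int.mod ((primer[j % primer.length]?).getD 0 - v) 29 with hedef
    have hstepB : pvBStep primer (acc, out) ((j : Int), c)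
        = (acc.set (j % primer.length) v, out ++ [e]) := by
      simp only [pvBStep, PySem.Int.mod_natCast, PySem.List.pyGet?_natCast,
        PySem.List.pySetD_natCast, List.getElem?_set_self hr0a, Option.getD_some,
        ← hvdef, ← hedef]
    -- the element A appends equals e, by the invariant at k = 0
    have h0 := hinv 0 hp
    simp only [Nat.add_zero] at h0
    have helem : e = PySem.Int.mod (((primer ++ out)[j]?).getD 0 - c) 29 := by
      rw [hedef, hvdef, hmodpos, hmodpos, hmodpos]; omega
    have hstepA : pvStep ciphertext primer out j = out ++ [e] := by
      rw [helem]; simp [pvStep, PySem.List.pyGet?_natCast, hc]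
    rw [PySem.List.enumerate_cons, List.foldl_cons, hstepB, List.length_cons,
      List.range'_succ, List.foldl_cons, hstepA,
      show ((j : Int) + 1) = ((j + 1 : Nat) : Int) from by push_cast; ring]
    refine ih (j + 1) (out ++ [e]) _ (fun i => by have := hcs (i + 1); rwa [show j + (i + 1) = j + 1 + i from by omega] at this)
      (by simp [hout]) (by simp [hacc]) ?_
    -- re-establish the invariant
    intro k hk
    have hlen2 : (primer ++ out).length = primer.length + j := by simp [hout]
    by_cases hkp : k = primer.length - 1
    · -- index j+1+k = j+p : residue j % p, freshly set acc slot, key slot is the new element e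
      have hidx : j + 1 + k = j + primer.length := by omega
      have hres : (j + primer.length) % primer.length = j % primer.length := Nat.add_mod_right j _
      have hkey : ((primer ++ (out ++ [e]))[j + primer.length]?) = some e := by
        rw [← List.append_assoc,
          show j + primer.length = (primer ++ out).length from by omega]
        exact List.getElem?_concat_length
      rw [hidx, hres, hkey, List.getElem?_set_self hr0a]
      simp only [Option.getD_some]
      rw [hedef, hvdef, hmodpos, hmodpos] at *
      omega
    · -- index j+1+k = j+(k+1) with 0 < k+1 < p : untouched acc slot, unchanged key slot
      have hk1 : k + 1 < primer.length := by omega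
      have hres : (j + 1 + k) % primer.length ≠ j % primer.length := by
        have h1 : (j + 1 + k) % primer.length
            = (j % primer.length + (k + 1)) % primer.length := by
          rw [show j + 1 + k = j + (k + 1) from by omega, Nat.add_mod,
            Nat.mod_eq_of_lt hk1]
        by_cases hlt : j % primer.length + (k + 1) < primer.length
        · rw [h1, Nat.mod_eq_of_lt hlt]; omega
        · rw [h1, Nat.mod_eq_sub_mod (by omega),
            Nat.mod_eq_of_lt (by omega)]
          omega
      have hidxlt : j + 1 + k < (primer ++ out).length := by omega
      have hkey : ((primer ++ (out ++ [e]))[j + 1 + k]?) = (primer ++ out)[j + 1 + k]? := by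
        rw [← List.append_assoc]; exact List.getElem?_append_left hidxlt
      have hprev := hinv (k + 1) hk1
      rw [show j + (k + 1) = j + 1 + k from by omega] at hprev
      rw [hkey, List.getElem?_set_ne (Ne.symm hres)]
      exact hprev

-- ===== VERDICT (by name: the statement is the Claim_ definition above) =====
theorem plaintext_autokey_minuend_decrypt_spec : Claim_equal_plaintext_autokey_minuend_decrypt := by
  intro ciphertext primer _ hpre
  unfold Spec_plaintext_autokey_minuend_decrypt plaintext_autokey_minuend_decrypt plaintext_autokey_minuend_decrypt_alt
  rcases hpre with hp | hct
  · have hp' : 0 < primer.length := List.length_pos_iff.mpr hp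
    have hA := pvA_inv ciphertext primer (List.range ciphertext.length) []
    rw [show primer = primer ++ ([] : List Int) from by simp] at hA
    simp only [List.append_nil] at hA
    rw [hA]
    have hB := pvB_loop ciphertext primer hp' ciphertext 0 [] (List.replicate primer.length 0)
      (fun i => by simp) rfl (by simp)
      (fun k hk => by
        simp [hk, Nat.mod_eq_of_lt hk])
    rw [show ((0 : Nat) : Int) = (0 : Int) from rfl] at hB
    rw [hB, List.range_eq_range']
  · subst hct; rfl
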